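-- pv_equiv track=rewrite | github.com/scottfones/HW2_Cryptograms | crypoback.py | is_good_cipher
-- ===== SOURCE A (Python) =====
-- def is_good_cipher(decoded: str, encoded: str) -> bool:
--     """Check if the decoded string is valid.
--
--     Create a map for each indexed position. A valid decoding must be a one-to-one mapping.
--     """
--     cipher_map: dict[str, str] = {}
--     for (enc, dec) in zip(encoded, decoded):
--         if enc not in cipher_map:
--             cipher_map[enc] = dec
--         elif cipher_map[enc] != dec:
--             return False
--     if len(set(decoded)) != len(set(encoded)):
--         return False
--     return True
-- ===== SOURCE B (Python) =====
-- def is_good_cipher(decoded: str, encoded: str) -> bool: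
--     """One-to-one mapping check via set cardinalities instead of an incremental dict."""
--     pairs = set(zip(encoded, decoded))
--     consistent = len(pairs) == len({enc for enc, _ in pairs})
--     return consistent and len(set(decoded)) == len(set(encoded))
-- ===== Notes on version B (the rewrite author's own statement) =====
-- stated objective: simpler
-- what changed: Replaced the incremental dict-building loop with early return by a one-shot set construction: the zipped pair set is a one-to-one-consistent mapping iff it has as many elements as distinct encoded characters, combined with A's final cardinality check over the full strings.
import Mathlib
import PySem

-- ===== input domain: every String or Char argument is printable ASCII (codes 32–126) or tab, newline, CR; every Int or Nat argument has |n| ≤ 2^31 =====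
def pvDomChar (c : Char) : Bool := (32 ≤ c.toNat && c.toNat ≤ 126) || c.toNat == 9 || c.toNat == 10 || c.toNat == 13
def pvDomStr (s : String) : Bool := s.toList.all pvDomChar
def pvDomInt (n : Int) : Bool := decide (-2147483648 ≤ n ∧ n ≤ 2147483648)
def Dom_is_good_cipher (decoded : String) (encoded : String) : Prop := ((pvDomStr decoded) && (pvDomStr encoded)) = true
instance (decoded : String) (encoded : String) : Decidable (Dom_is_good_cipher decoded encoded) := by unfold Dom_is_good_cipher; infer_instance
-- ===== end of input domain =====

-- B replaces A's incremental dict loop with early return by a one-shot comparison of set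
-- cardinalities (the zipped pair set vs its projection to encoded characters); objective: simpler.

-- ===== PORT A =====
-- the 'for (enc, dec) in zip(...)' loop: returns none on the early 'return False', otherwise the final dict
def pvLoopA (m : PySem.Dict Char Char) : List (Char × Char) → Option (PySem.Dict Char Char)
  | [] => some m
  | (e, d) :: rest =>
    match m.get? e with
    | none => pvLoopA (m.insert e d) rest          -- enc not in cipher_map
    | some d' => if d' ≠ d then none else pvLoopA m rest

def is_good_cipher (decoded : String) (encoded : String) : Bool :=
  match pvLoopA PySem.Dict.empty (encoded.toList.zip decoded.toList) with
  | none => false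
  | some _ =>
    if (PySem.Set.ofList decoded.toList).length ≠ (PySem.Set.ofList encoded.toList).length then
      false
    else
      true

-- ===== PORT B =====
def is_good_cipher_alt (decoded : String) (encoded : String) : Bool :=
  let pairs : PySem.Set (Char × Char) := PySem.Set.ofList (encoded.toList.zip decoded.toList)
  let encs : PySem.Set Char := PySem.Set.ofList (pairs.map Prod.fst)
  (pairs.length == encs.length)
    && ((PySem.Set.ofList decoded.toList).length == (PySem.Set.ofList encoded.toList).length)

-- ===== PRECONDITION & SPEC =====
def Spec_is_good_cipher (decoded : String) (encoded : String) (out : Bool) : Prop := out = is_good_cipher_alt decoded encoded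
instance (decoded : String) (encoded : String) (out : Bool) : Decidable (Spec_is_good_cipher decoded encoded out) := by unfold Spec_is_good_cipher; infer_instance

-- ===== CLAIM (what is proved, stated in full; the proofs are below) =====
def Claim_equal_is_good_cipher : Prop := ∀ (decoded : String) (encoded : String), Dom_is_good_cipher decoded encoded → Spec_is_good_cipher decoded encoded (is_good_cipher decoded encoded)

-- ===== LEMMAS AND PROOFS =====

-- "the pair list is the graph of a function": shared characterisation both ports are reduced to
def pvFunctional (l : List (Char × Char)) : Prop :=
  ∀ a b c, (a, b) ∈ l → (a, c) ∈ l → b = c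

lemma pvFunctional_of_nodup_fst (l : List (Char × Char)) :
    (l.map Prod.fst).Nodup → pvFunctional l := by
  induction l with
  | nil => exact fun _ _ _ _ hb _ => absurd hb (by simp)
  | cons p rest ih =>
    intro h a b c hb hc
    obtain ⟨pe, pd⟩ := p
    rw [List.map_cons, List.nodup_cons] at h
    rcases List.mem_cons.mp hb with h1 | hb'
    · rcases List.mem_cons.mp hc with h2 | hc'
      · injection h1 with ha1 hb1
        injection h2 with ha2 hc2
        rw [hb1, hc2]
      · injection h1 with ha1 hb1
        exact absurd (List.mem_map.mpr ⟨(a, c), hc', by simp [ha1]⟩) h.1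
    · rcases List.mem_cons.mp hc with h2 | hc'
      · injection h2 with ha2 hc2
        exact absurd (List.mem_map.mpr ⟨(a, b), hb', by simp [ha2]⟩) h.1
      · exact ih h.2 a b c hb' hc'

lemma nodup_fst_of_pvFunctional (l : List (Char × Char)) :
    l.Nodup → pvFunctional l → (l.map Prod.fst).Nodup := by
  induction l with
  | nil => simp
  | cons p rest ih =>
    intro hnd hf
    obtain ⟨e, d⟩ := p
    rw [List.nodup_cons] at hnd
    rw [List.map_cons, List.nodup_cons]
    refine ⟨?_, ih hnd.2
      (fun a b c hb hc => hf a b c (List.mem_cons_of_mem _ hb) (List.mem_cons_of_mem _ hc))⟩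
    intro hmem
    obtain ⟨⟨a, c⟩, hmem', heq⟩ := List.mem_map.mp hmem
    dsimp at heq
    have hmem'' : (e, c) ∈ rest := by rw [← heq]; exact hmem'
    have hdc : d = c := hf e d c (List.mem_cons_self ..) (List.mem_cons_of_mem _ hmem'')
    exact hnd.1 (hdc ▸ hmem'')

lemma pvFunctional_iff_of_same_mem {l l' : List (Char × Char)}
    (h : ∀ p : Char × Char, p ∈ l ↔ p ∈ l') : pvFunctional l ↔ pvFunctional l' := by
  constructor <;> intro hf a b c hb hc
  · exact hf a b c ((h _).mpr hb) ((h _).mpr hc)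
  · exact hf a b c ((h _).mp hb) ((h _).mp hc)

-- len(set(ys)) == len(ys) exactly when ys has no duplicates
lemma len_ofList_eq_iff {α : Type} [BEq α] [LawfulBEq α] (ys : List α) :
    (PySem.Set.ofList ys).length = ys.length ↔ ys.Nodup := by
  induction ys using List.reverseRecOn with
  | nil => simp [PySem.Set.ofList_nil]
  | append_singleton ys y ih =>
    have hle : (PySem.Set.ofList ys).length ≤ ys.length := PySem.Set.length_ofList_le ys
    have hrhs : (ys ++ [y]).Nodup ↔ ys.Nodup ∧ y ∉ ys := by
      simp [List.nodup_append]
      intro _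
      constructor
      · intro h hm; exact h y hm rfl
      · intro h a ha he; exact h (he ▸ ha)
    rw [PySem.Set.ofList_append_singleton, hrhs]
    by_cases hy : y ∈ ys
    · have hc : PySem.Set.contains (PySem.Set.ofList ys) y = true := by
        simp [PySem.Set.mem_ofList, hy]
      simp only [PySem.Set.add, hc, if_true, List.length_append, List.length_singleton]
      constructor
      · intro h; omega
      · rintro ⟨-, hmem⟩; exact absurd hy hmem
    · have hc : PySem.Set.contains (PySem.Set.ofList ys) y = false := by
        simp only [Bool.eq_false_iff, ne_eq, PySem.Set.contains_iff, PySem.Set.mem_ofList]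
        exact hy
      simp only [PySem.Set.add, hc, Bool.false_eq_true, if_false, List.length_append,
        List.length_singleton]
      constructor
      · intro h
        exact ⟨ih.mp (by omega), hy⟩
      · rintro ⟨h, -⟩
        have := ih.mpr h; omega

-- the A-side loop succeeds exactly on functional (dict-items ++ remaining) lists
lemma pvLoopA_isSome (l : List (Char × Char)) :
    ∀ m : PySem.Dict Char Char, m.keys.Nodup →
      ((pvLoopA m l).isSome = true ↔ pvFunctional (m.items ++ l)) := by
  induction l with
  | nil =>
    intro m hm
    simp only [pvLoopA, Option.isSome_some, List.append_nil, true_iff]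
    exact pvFunctional_of_nodup_fst m.items (by simpa [PySem.Dict.keys] using hm)
  | cons p rest ih =>
    rintro m hm
    obtain ⟨e, d⟩ := p
    match hget : m.get? e with
    | none =>
      have hnc : m.contains e = false := by
        rw [PySem.Dict.contains_eq_isSome_get?, hget]; rfl
      have hkeys : (m.insert e d).keys.Nodup := PySem.Dict.nodup_keys_insert m e d hm
      have hitems := PySem.Dict.items_insert_of_not_contains (d := m) (k := e) (v := d) hnc
      simp only [pvLoopA, hget]
      rw [ih (m.insert e d) hkeys, hitems, List.append_assoc, List.singleton_append]
    | some d' =>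
      have hmem : (e, d') ∈ m.items := PySem.Dict.mem_items_of_get?_eq_some m hget
      by_cases hne : d' = d
      · subst hne
        simp only [pvLoopA, hget, ne_eq, not_true_eq_false, if_false]
        rw [ih m hm]
        refine pvFunctional_iff_of_same_mem (fun p => ?_)
        simp only [List.mem_append, List.mem_cons]
        constructor
        · rintro (h | h)
          · exact Or.inl h
          · exact Or.inr (Or.inr h)
        · rintro (h | rfl | h)
          · exact Or.inl h
          · exact Or.inl hmem
          · exact Or.inr h
      · simp only [pvLoopA, hget, ne_eq, hne, not_false_eq_true, if_true, Option.isSome_none,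
          Bool.false_eq_true, false_iff]
        intro hf
        exact hne (hf e d' d (List.mem_append.mpr (Or.inl hmem))
          (List.mem_append.mpr (Or.inr (List.mem_cons_self ..))))

-- the B-side cardinality test characterises the same property
lemma pvAlt_pairs_iff (l : List (Char × Char)) :
    ((PySem.Set.ofList l).length =
      (PySem.Set.ofList ((PySem.Set.ofList l).map Prod.fst)).length) ↔ pvFunctional l := by
  have hnd : (PySem.Set.ofList l).Nodup := PySem.Set.nodup_ofList l
  have hmem : ∀ p : Char × Char, p ∈ PySem.Set.ofList l ↔ p ∈ l := fun p =>
    PySem.Set.mem_ofList ..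
  have hlen : (PySem.Set.ofList l).length = ((PySem.Set.ofList l).map Prod.fst).length :=
    (List.length_map ..).symm
  rw [hlen, eq_comm, len_ofList_eq_iff]
  constructor
  · intro h
    exact (pvFunctional_iff_of_same_mem hmem).mp
      (pvFunctional_of_nodup_fst _ h)
  · intro h
    exact nodup_fst_of_pvFunctional _ hnd ((pvFunctional_iff_of_same_mem hmem).mpr h)

-- ===== VERDICT (by name: the statement is the Claim_ definition above) =====
theorem is_good_cipher_spec : Claim_equal_is_good_cipher := by
  intro decoded encoded _
  unfold Spec_is_good_cipher
  set l := encoded.toList.zip decoded.toList with hl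
  have hEmpty : (PySem.Dict.empty : PySem.Dict Char Char).items = [] := rfl
  have hA : (pvLoopA PySem.Dict.empty l).isSome = true ↔ pvFunctional l := by
    have h := pvLoopA_isSome l PySem.Dict.empty PySem.Dict.nodup_keys_empty
    rwa [hEmpty, List.nil_append] at h
  by_cases hf : pvFunctional l
  · obtain ⟨m, hm⟩ := Option.isSome_iff_exists.mp (hA.mpr hf)
    have hB : ((PySem.Set.ofList l).length ==
        (PySem.Set.ofList ((PySem.Set.ofList l).map Prod.fst)).length) = true :=
      beq_iff_eq.mpr ((pvAlt_pairs_iff l).mpr hf)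
    simp only [is_good_cipher, is_good_cipher_alt, hm, ← hl, hB, Bool.true_and]
    by_cases hlen : (PySem.Set.ofList decoded.toList).length =
        (PySem.Set.ofList encoded.toList).length <;>
      simp [hlen]
  · have hnone : pvLoopA PySem.Dict.empty l = none :=
      Option.not_isSome_iff_eq_none.mp (fun h => hf (hA.mp h))
    have hB : ((PySem.Set.ofList l).length ==
        (PySem.Set.ofList ((PySem.Set.ofList l).map Prod.fst)).length) = false := by
      rw [beq_eq_false_iff_ne]; exact fun h => hf ((pvAlt_pairs_iff l).mp h)
    simp only [is_good_cipher, is_good_cipher_alt, hnone, ← hl, hB, Bool.false_and]
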